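-- pv_equiv track=rewrite | github.com/VinothManivannan/attempt2-mirror | cmlpytools/tahini/tahini_cmap.py | _mask_to_bits
-- ===== SOURCE A (Python) =====
-- from typing import List, Optional, Dict, Tuple
--
-- def _mask_to_bits(mask: int) -> Tuple[int, int]:
--     """Calculate the position and length of a field using its mask.
--
--     Example: _mask_to_bits(0x30) == (4, 2)
--
--     Args:
--         mask (int): Mask representing the bitfield
--
--     Returns:
--         Tuple[int, int]: Position and length of the bitfield
--     """
--     field_pos = 0
--     field_length = 0
--
--     # Clear bits one by one until the mask is null
--     bit = 0
--     while mask != 0: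
--         new_mask = mask & ~(1 << bit)
--         if new_mask == mask:
--             # No bit was actually cleared
--             field_pos += 1
--         else:
--             # A bit was cleared
--             field_length += 1
--         mask = new_mask
--         bit += 1
--
--     return (field_pos, field_length)
-- ===== SOURCE B (Python) =====
-- def _mask_to_bits(mask):
--     """Compute the bitfield position and length directly: length is the
--     popcount of the mask, position is the number of zero bits below the
--     top set bit (bit_length - popcount)."""
--     field_length = bin(mask).count("1")
--     field_pos = mask.bit_length() - field_length
--     return (field_pos, field_length)
-- ===== Notes on version B (the rewrite author's own statement) =====
-- stated objective: simpler
-- what changed: Replaces the bit-by-bit clearing loop with two closed-form computations: field_length = popcount(mask) and field_pos = mask.bit_length() - popcount(mask).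
import Mathlib
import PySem

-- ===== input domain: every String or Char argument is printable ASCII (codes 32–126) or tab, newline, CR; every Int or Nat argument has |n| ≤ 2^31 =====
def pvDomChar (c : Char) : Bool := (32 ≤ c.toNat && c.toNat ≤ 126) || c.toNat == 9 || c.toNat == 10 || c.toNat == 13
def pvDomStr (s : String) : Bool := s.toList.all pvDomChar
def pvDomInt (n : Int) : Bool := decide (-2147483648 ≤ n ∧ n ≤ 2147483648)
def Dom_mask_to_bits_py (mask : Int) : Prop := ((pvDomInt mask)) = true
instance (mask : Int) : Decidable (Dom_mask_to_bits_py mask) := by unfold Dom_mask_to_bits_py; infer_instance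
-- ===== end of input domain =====

-- B computes the same (position, length) pair by closed form — popcount and bit_length — instead of
-- A's bit-by-bit clearing loop (objective: simpler).

-- ===== PORT A =====
-- The while loop of A, as a fuel recursion over the same state (mask, bit, field_pos, field_length).
-- The fuel only makes the recursion total: 64 steps always suffice on the domain (|mask| ≤ 2^31,
-- mask ≥ 0 by Pre_), since each iteration clears bit `bit` of a mask below 2^64.
def maskLoop (fuel : Nat) (mask : Int) (bit : Nat) (field_pos field_length : Int) : Int × Int :=
  match fuel with
  | 0 => (field_pos, field_length)
  | f+1 =>
    if mask ≠ 0 then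
      -- new_mask = mask & ~(1 << bit)  (bit is the loop counter, always ≥ 0)
      let new_mask := PySem.Int.band mask (Int.not ((1:Int) <<< bit))
      if new_mask = mask then maskLoop f new_mask (bit+1) (field_pos+1) field_length
      else maskLoop f new_mask (bit+1) field_pos (field_length+1)
    else (field_pos, field_length)

def mask_to_bits_py (mask : Int) : Int × Int :=
  maskLoop 64 mask 0 0 0

-- ===== PORT B =====
-- Source B: field_length = bin(mask).count("1") (= mask.bit_count() = PySem.Int.bitCount);
--       field_pos = mask.bit_length() - field_length
def mask_to_bits_py_alt (mask : Int) : Int × Int :=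
  let field_length : Int := (PySem.Int.bitCount mask : Int)
  ((PySem.Int.bitLength mask : Int) - field_length, field_length)

-- ===== PRECONDITION & SPEC =====
-- Pre_ excludes negative masks: on them A's while loop never terminates (Python A never returns).
def Pre_mask_to_bits_py (mask : Int) : Prop := 0 ≤ mask
instance (mask : Int) : Decidable (Pre_mask_to_bits_py mask) := by unfold Pre_mask_to_bits_py; infer_instance
def pvWitness_mask_to_bits_py : Int := 48

def Spec_mask_to_bits_py (mask : Int) (out : Int × Int) : Prop := out = mask_to_bits_py_alt mask
instance (mask : Int) (out : Int × Int) : Decidable (Spec_mask_to_bits_py mask out) := by unfold Spec_mask_to_bits_py; infer_instance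

-- ===== CLAIM (what is proved, stated in full; the proofs are below) =====
def Claim_equal_mask_to_bits_py : Prop := ∀ (mask : Int), Dom_mask_to_bits_py mask → Pre_mask_to_bits_py mask → Spec_mask_to_bits_py mask (mask_to_bits_py mask)

-- ===== LEMMAS AND PROOFS =====

lemma int_not_eq (x : Int) : Int.not x = -x - 1 := by
  cases x <;> simp [Int.not] <;> omega

lemma and_two_pow_step (m bit : Nat) : (m * 2^bit) &&& 2^bit = (m % 2) * 2^bit := by
  rw [Nat.and_two_pow, Nat.testBit_mul_two_pow]
  simp [Nat.testBit]
  rcases Nat.mod_two_eq_zero_or_one m with h | h <;> simp [h]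

-- One loop step: clearing bit `bit` of m·2^bit leaves (m/2)·2^(bit+1).
lemma band_step (m bit : Nat) :
    PySem.Int.band ((m:Int) * 2^bit) (Int.not ((1:Int) <<< bit)) = ((m/2 : Nat):Int) * 2^(bit+1) := by
  rw [Int.shiftLeft_eq, one_mul, int_not_eq]
  have ha : ((m:Int) * 2^bit) = ((m * 2^bit : Nat) : Int) := by push_cast; ring
  rw [ha, PySem.Int.band]
  have h1 : (0:Int) ≤ ((m * 2^bit : Nat) : Int) := by positivity
  have h2 : ¬ (0:Int) ≤ -(2:Int)^bit - 1 := by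
    have : (0:Int) < 2^bit := by positivity
    omega
  rw [if_pos h1, if_neg h2]
  have h3 : (-(-(2:Int)^bit - 1) - 1).toNat = 2^bit := by
    have : (-(-(2:Int)^bit - 1) - 1) = ((2^bit : Nat) : Int) := by push_cast; ring
    rw [this, Int.toNat_natCast]
  rw [Int.toNat_natCast, h3, and_two_pow_step]
  have : m * 2^bit - m % 2 * 2^bit = (m/2) * 2^(bit+1) := by
    have h4 := Nat.div_add_mod m 2
    have h5 : m % 2 ≤ m := Nat.mod_le m 2
    rw [pow_succ]
    rw [← Nat.sub_mul]
    ring_nf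
    rw [show m - m % 2 = 2 * (m/2) by omega]
    ring
  rw [this]
  push_cast
  ring

-- Loop invariant: started at state (m·2^bit, bit, pos, len) with enough fuel, the loop adds
-- (bit_length m − popcount m) to pos and popcount m to len.
lemma maskLoop_eq (fuel : Nat) : ∀ (m bit : Nat) (pos len : Int), m < 2^fuel →
    maskLoop fuel ((m:Int) * 2^bit) bit pos len =
      (pos + ((PySem.Int.bitLength (m:Int) : Int) - (PySem.Int.bitCount (m:Int) : Int)),
       len + (PySem.Int.bitCount (m:Int) : Int)) := by
  induction fuel with
  | zero =>
    intro m bit pos len hm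
    interval_cases m
    simp [maskLoop, PySem.Int.bitLength_zero, PySem.Int.bitCount_zero]
  | succ f ih =>
    intro m bit pos len hm
    by_cases hm0 : m = 0
    · subst hm0
      simp [maskLoop, PySem.Int.bitLength_zero, PySem.Int.bitCount_zero]
    · have hmpos : 0 < m := Nat.pos_of_ne_zero hm0
      have hne : ((m:Int) * 2^bit) ≠ 0 := by positivity
      have hdiv : m / 2 < 2^f := by
        have : 2^(f+1) = 2 * 2^f := by ring
        omega
      have hC := PySem.Int.bitCount_natCast hmpos
      have hL := PySem.Int.bitLength_natCast hmpos
      rw [maskLoop, if_pos hne]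
      simp only [band_step]
      have hih := ih (m/2) (bit+1)
      by_cases heq : ((m/2 : Nat):Int) * 2^(bit+1) = (m:Int) * 2^bit
      · -- bit `bit` was already clear: field_pos += 1
        have hmod : m % 2 = 0 := by
          have h2 : ((2*(m/2) : Nat):Int) * 2^bit = ((m/2 : Nat):Int) * 2^(bit+1) := by
            push_cast; ring
          rw [← h2] at heq
          have := mul_right_cancel₀ (b := (2:Int)^bit) (by positivity) heq
          have : (2*(m/2) : Nat) = m := by exact_mod_cast this
          omega
        rw [if_pos heq, hih (pos+1) len hdiv]
        set C := PySem.Int.bitCount ((m/2 : Nat):Int) with hCdef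
        set L := PySem.Int.bitLength ((m/2 : Nat):Int) with hLdef
        rw [hC, hL]
        rw [Prod.mk.injEq, hmod]; refine ⟨?_, ?_⟩ <;> (push_cast; ring)
      · -- bit `bit` was set and got cleared: field_length += 1
        have hmod : m % 2 = 1 := by
          rcases Nat.mod_two_eq_zero_or_one m with h | h
          · exfalso; apply heq
            have : (2*(m/2) : Nat) = m := by omega
            calc ((m/2 : Nat):Int) * 2^(bit+1) = ((2*(m/2) : Nat):Int) * 2^bit := by push_cast; ring
              _ = (m:Int) * 2^bit := by rw [this]
          · exact h
        rw [if_neg heq, hih pos (len+1) hdiv]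
        set C := PySem.Int.bitCount ((m/2 : Nat):Int) with hCdef
        set L := PySem.Int.bitLength ((m/2 : Nat):Int) with hLdef
        rw [hC, hL]
        rw [Prod.mk.injEq, hmod]; refine ⟨?_, ?_⟩ <;> (push_cast; ring)

-- ===== VERDICT (by name: the statement is the Claim_ definition above) =====
theorem mask_to_bits_py_spec : Claim_equal_mask_to_bits_py := by
  intro mask hdom hpre
  obtain ⟨n, rfl⟩ : ∃ n : Nat, mask = (n : Int) :=
    ⟨mask.toNat, (Int.toNat_of_nonneg hpre).symm⟩
  have hn : n < 2^64 := by
    have h1 : (n : Int) ≤ 2147483648 := by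
      unfold Dom_mask_to_bits_py pvDomInt at hdom
      simp at hdom
      exact_mod_cast hdom
    have h2 : n ≤ 2147483648 := by exact_mod_cast h1
    have h3 : (2147483648 : Nat) < 2^64 := by norm_num
    omega
  unfold Spec_mask_to_bits_py mask_to_bits_py mask_to_bits_py_alt
  have h := maskLoop_eq 64 n 0 0 0 hn
  rw [show ((n:Int) * 2^(0:Nat)) = (n:Int) by ring] at h
  rw [h]
  simp
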